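-- pv_equiv track=rewrite | github.com/sozelfist/Python-Fundamentals | algorithms/dynamic_programming/max_difference_pair.py | max_difference_pairs
-- ===== SOURCE A (Python) =====
-- def max_difference_pairs(arr: list[int]) -> tuple[int, tuple[int, int]]:
--     """
--     Finds the maximum difference between pairs of elements in an array.
--
--     Args:
--         arr (List[int]): Input array of integers.
--
--     Returns:
--         Tuple[int, Tuple[int, int]]: Maximum difference between pairs
--         of elements and the pair (i, j) where arr[i] and arr[j] gives
--         the maximum difference.
--     """
--     if not arr or len(arr) < 2:
--         return 0, None
--
--     min_val = arr[0]
--     max_diff = 0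
--     max_pair = (0, 0)
--
--     strictly_decreasing = True
--
--     for i in range(1, len(arr)):
--         if arr[i] > min_val:
--             if arr[i] - min_val > max_diff:
--                 max_diff = arr[i] - min_val
--                 max_pair = (min_val, arr[i])
--             strictly_decreasing = False
--         elif arr[i] == min_val:
--             continue
--         else:
--             min_val = arr[i]
--
--     if strictly_decreasing:
--         return 0, None
--
--     return max_diff, max_pair
-- ===== SOURCE B (Python) =====
-- def max_difference_pairs(arr: list[int]) -> tuple[int, tuple[int, int]]:
--     if not arr or len(arr) < 2:
--         return 0, None
--     # pass 1: mins[j-1] = min(arr[0..j-1])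
--     mins = [arr[0]]
--     for x in arr[1:-1]:
--         m = mins[-1]
--         mins.append(m if m < x else x)
--     # pass 2: best strictly-improving difference
--     best, pair = 0, None
--     for m, y in zip(mins, arr[1:]):
--         if y - m > best:
--             best, pair = y - m, (m, y)
--     return best, pair
-- ===== Notes on version B (the rewrite author's own statement) =====
-- stated objective: alternative
-- what changed: Replaces A's single loop with mutable running state (min, best, pair, strictly_decreasing flag) by a two-pass decomposition: first build an explicit prefix-minimum table, then scan arr[1:] zipped with the table updating only (best, pair); the flag disappears because pair stays None exactly when no element ever exceeds its prefix minimum.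
import Mathlib
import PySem

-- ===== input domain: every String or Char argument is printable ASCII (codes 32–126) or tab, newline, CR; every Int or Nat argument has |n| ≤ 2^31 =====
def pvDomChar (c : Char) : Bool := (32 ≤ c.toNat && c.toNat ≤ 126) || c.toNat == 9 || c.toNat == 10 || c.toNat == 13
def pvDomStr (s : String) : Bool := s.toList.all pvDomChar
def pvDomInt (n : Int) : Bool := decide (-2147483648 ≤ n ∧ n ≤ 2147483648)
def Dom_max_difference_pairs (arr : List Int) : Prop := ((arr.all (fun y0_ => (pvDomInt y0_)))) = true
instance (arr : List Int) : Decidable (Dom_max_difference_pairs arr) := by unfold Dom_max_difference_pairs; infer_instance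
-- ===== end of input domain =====

-- B replaces A's single loop over running (min, best, pair, flag) state by a two-pass
-- decomposition: an explicit prefix-minimum table, then a scan of zip(mins, arr[1:]);
-- same O(n) cost ("alternative", not claimed faster).

-- ===== PORT A =====
-- loop body of A's `for i in range(1, len(arr))`; state (min_val, max_diff, max_pair, strictly_decreasing)
def pvAStep (s : Int × Int × (Int × Int) × Bool) (a : Int) : Int × Int × (Int × Int) × Bool :=
  if a > s.1 then
    if a - s.1 > s.2.1 then (s.1, a - s.1, (s.1, a), false)
    else (s.1, s.2.1, s.2.2.1, false)
  else if a = s.1 then s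
  else (a, s.2.1, s.2.2.1, s.2.2.2)

def max_difference_pairs (arr : List Int) : Int × (Option (Int × Int)) :=
  match arr with
  | [] => (0, none)                                   -- `if not arr or len(arr) < 2`
  | h :: t =>
    if t.isEmpty then (0, none)
    else
      let s := t.foldl pvAStep (h, 0, (0, 0), true)
      if s.2.2.2 then (0, none) else (s.2.1, some s.2.2.1)

-- ===== PORT B =====
-- `mins = [arr[0]]; for x in arr[1:-1]: mins.append(min(mins[-1], x))`,
-- the append loop realised as structural recursion carrying mins[-1]
def pvBuildMins (m : Int) : List Int → List Int
  | [] => []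
  | x :: xs => (if m < x then m else x) :: pvBuildMins (if m < x then m else x) xs

-- loop body of B's `for m, y in zip(mins, arr[1:])`
def pvBStep (s : Int × Option (Int × Int)) (p : Int × Int) : Int × Option (Int × Int) :=
  if p.2 - p.1 > s.1 then (p.2 - p.1, some (p.1, p.2)) else s

def max_difference_pairs_alt (arr : List Int) : Int × (Option (Int × Int)) :=
  match arr with
  | [] => (0, none)                                   -- `if not arr or len(arr) < 2`
  | h :: t =>
    if t.isEmpty then (0, none)
    else
      let mins := h :: pvBuildMins h t.dropLast
      (mins.zip t).foldl pvBStep (0, none)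

-- ===== PRECONDITION & SPEC =====
def Spec_max_difference_pairs (arr : List Int) (out : Int × (Option (Int × Int))) : Prop := out = max_difference_pairs_alt arr
instance (arr : List Int) (out : Int × (Option (Int × Int))) : Decidable (Spec_max_difference_pairs arr out) := by unfold Spec_max_difference_pairs; infer_instance

-- ===== CLAIM (what is proved, stated in full; the proofs are below) =====
def Claim_equal_max_difference_pairs : Prop := ∀ (arr : List Int), Dom_max_difference_pairs arr → Spec_max_difference_pairs arr (max_difference_pairs arr)

-- ===== LEMMAS AND PROOFS =====

-- reference recursion bridging both ports: running min + strict best-update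
def pvRun (mv : Int) (s : Int × Option (Int × Int)) : List Int → Int × Option (Int × Int)
  | [] => s
  | a :: t => pvRun (if mv < a then mv else a)
      (if a - mv > s.1 then (a - mv, some (mv, a)) else s) t

theorem pv_zipfold (t : List Int) : ∀ (m : Int) (s : Int × Option (Int × Int)),
    ((m :: pvBuildMins m t.dropLast).zip t).foldl pvBStep s = pvRun m s t := by
  induction t with
  | nil => intro m s; simp [pvRun]
  | cons a t ih =>
    intro m s
    cases t with
    | nil => simp [pvBuildMins, pvRun, pvBStep]
    | cons b t' =>
      have hdl : (a :: b :: t').dropLast = a :: (b :: t').dropLast := rfl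
      rw [hdl]
      simp only [pvBuildMins, List.zip, List.zipWith, List.foldl, pvRun, pvBStep]
      exact ih (if m < a then m else a) _

theorem pv_afold (t : List Int) : ∀ (mv md : Int) (mp : Int × Int) (sd : Bool)
    (p : Option (Int × Int)),
    0 ≤ md → (sd = true → p = none ∧ md = 0) → (sd = false → p = some mp) →
    (if (t.foldl pvAStep (mv, md, mp, sd)).2.2.2 then ((0 : Int), (none : Option (Int × Int)))
     else ((t.foldl pvAStep (mv, md, mp, sd)).2.1, some (t.foldl pvAStep (mv, md, mp, sd)).2.2.1))
    = pvRun mv (md, p) t := by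
  induction t with
  | nil =>
    intro mv md mp sd p hmd ht hf
    cases sd with
    | true => obtain ⟨hp, h0⟩ := ht rfl; simp [pvRun, hp, h0]
    | false => simp [pvRun, hf rfl]
  | cons a t ih =>
    intro mv md mp sd p hmd ht hf
    simp only [List.foldl_cons, pvRun]
    by_cases hgt : a > mv
    · rw [if_pos (show mv < a from hgt)]
      by_cases himp : a - mv > md
      · rw [show pvAStep (mv, md, mp, sd) a = (mv, a - mv, (mv, a), false) from by
              simp [pvAStep, hgt, himp],
            if_pos himp]
        exact ih mv (a - mv) (mv, a) false (some (mv, a)) (by omega) (by simp) (fun _ => rfl)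
      · have hsd : sd = false := by
          cases sd with
          | true => obtain ⟨_, h0⟩ := ht rfl; omega
          | false => rfl
        subst hsd
        rw [show pvAStep (mv, md, mp, false) a = (mv, md, mp, false) from by
              simp [pvAStep, hgt, himp],
            if_neg himp]
        exact ih mv md mp false p hmd (by simp) (fun _ => hf rfl)
    · by_cases heq : a = mv
      · subst heq
        rw [show pvAStep (a, md, mp, sd) a = (a, md, mp, sd) from by simp [pvAStep],
            if_neg (by omega : ¬ a - a > md), if_neg (by omega : ¬ a < a)]
        exact ih a md mp sd p hmd ht hf
      · rw [show pvAStep (mv, md, mp, sd) a = (a, md, mp, sd) from by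
              simp [pvAStep, hgt, heq],
            if_neg (by omega : ¬ a - mv > md), if_neg (by omega : ¬ mv < a)]
        exact ih a md mp sd p hmd ht hf

-- ===== VERDICT (by name: the statement is the Claim_ definition above) =====
theorem max_difference_pairs_spec : Claim_equal_max_difference_pairs := by
  intro arr _
  unfold Spec_max_difference_pairs max_difference_pairs max_difference_pairs_alt
  cases arr with
  | nil => rfl
  | cons h t =>
    cases t with
    | nil => rfl
    | cons b t' =>
      simp only [List.isEmpty_cons, Bool.false_eq_true, if_false]
      rw [pv_zipfold]
      exact pv_afold (b :: t') h 0 (0, 0) true none le_rfl (fun _ => ⟨rfl, rfl⟩) (by simp)
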